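-- pv_equiv track=rewrite | github.com/jasontan656/Otctopus_OS_AgentConsole | Skills/Meta-Enhance-Prompt/scripts/filter_prompt_shape_helper.py | _join_lines
-- ===== SOURCE A (Python) =====
-- def _join_lines(lines: list[str]) -> str:
--     joined: list[str] = []
--     for line in lines:
--         if not line:
--             if joined and joined[-1] != "":
--                 joined.append("")
--             continue
--         joined.append(line)
--     while joined and not joined[0]:
--         joined.pop(0)
--     while joined and not joined[-1]:
--         joined.pop()
--     return "\n".join(joined).strip()
-- ===== SOURCE B (Python) =====
-- def _join_lines(lines: list[str]) -> str:
--     # Group the lines into paragraphs (maximal runs of non-blank lines);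
--     # join each paragraph with "\n", paragraphs with "\n\n", strip the edges.
--     runs: list[list[str]] = []
--     cur: list[str] = []
--     for line in lines:
--         if line:
--             cur.append(line)
--         elif cur:
--             runs.append(cur)
--             cur = []
--     if cur:
--         runs.append(cur)
--     return "\n\n".join("\n".join(r) for r in runs).strip()
-- ===== Notes on version B (the rewrite author's own statement) =====
-- stated objective: idiomatic
-- what changed: Instead of building one flat list with an explicit collapse-blanks branch and two while-pop trimming loops, B groups the lines into paragraphs (runs of non-blank lines), joins each paragraph with '\n' and the paragraphs with '\n\n', letting the final strip handle the edges.
import Mathlib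
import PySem

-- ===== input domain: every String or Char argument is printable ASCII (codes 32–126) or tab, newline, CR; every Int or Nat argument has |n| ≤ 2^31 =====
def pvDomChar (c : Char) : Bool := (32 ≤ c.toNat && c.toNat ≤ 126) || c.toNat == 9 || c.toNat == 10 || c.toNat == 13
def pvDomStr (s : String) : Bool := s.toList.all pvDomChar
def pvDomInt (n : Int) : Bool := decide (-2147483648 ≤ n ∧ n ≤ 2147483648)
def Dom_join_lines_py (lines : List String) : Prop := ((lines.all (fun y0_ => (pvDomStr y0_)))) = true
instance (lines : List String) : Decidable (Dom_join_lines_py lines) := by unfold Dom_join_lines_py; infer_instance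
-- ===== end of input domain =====

-- B rewrites A's single flat accumulator (collapse-blanks branch + two while-pop trims)
-- as paragraph grouping: runs of non-blank lines joined by "\n", runs joined by "\n\n", then strip.

-- ===== PORT A =====
-- the `for line in lines` loop accumulating `joined`
def joinedLoopA (joined : List String) : List String → List String
  | [] => joined
  | line :: rest =>
    if line = "" then
      if joined ≠ [] ∧ PySem.List.pyGetD joined (-1) "" ≠ "" then
        joinedLoopA (joined ++ [""]) rest
      else
        joinedLoopA joined rest
    else
      joinedLoopA (joined ++ [line]) rest

-- `while joined and not joined[0]: joined.pop(0)`
def popFrontA : List String → List String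
  | [] => []
  | x :: xs => if x = "" then popFrontA xs else x :: xs

-- `while joined and not joined[-1]: joined.pop()` — the same popping loop, run on the reversed list
def popBackA (l : List String) : List String := (popFrontA l.reverse).reverse

def join_lines_py (lines : List String) : String :=
  PySem.Str.strip (PySem.Str.join "\n" (popBackA (popFrontA (joinedLoopA [] lines))))

-- ===== PORT B =====
-- the `for line in lines` loop accumulating (runs, cur)
def runsLoopB (runs : List (List String)) (cur : List String) : List String → List (List String) × List String
  | [] => (runs, cur)
  | line :: rest =>
    if line ≠ "" then runsLoopB runs (cur ++ [line]) rest
    else if cur ≠ [] then runsLoopB (runs ++ [cur]) [] rest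
    else runsLoopB runs cur rest

def join_lines_py_alt (lines : List String) : String :=
  let rc := runsLoopB [] [] lines
  let runs := if rc.2 ≠ [] then rc.1 ++ [rc.2] else rc.1
  PySem.Str.strip (PySem.Str.join "\n\n" (runs.map (fun r => PySem.Str.join "\n" r)))

-- ===== PRECONDITION & SPEC =====
def Spec_join_lines_py (lines : List String) (out : String) : Prop := out = join_lines_py_alt lines
instance (lines : List String) (out : String) : Decidable (Spec_join_lines_py lines out) := by unfold Spec_join_lines_py; infer_instance

-- ===== CLAIM (what is proved, stated in full; the proofs are below) =====
def Claim_equal_join_lines_py : Prop := ∀ (lines : List String), Dom_join_lines_py lines → Spec_join_lines_py lines (join_lines_py lines)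

-- ===== LEMMAS AND PROOFS =====

-- A's accumulator, expressed from B's state (runs of non-blank lines + current run):
-- empty if nothing yet, otherwise the runs separated by single blanks, with a trailing
-- blank exactly when the last processed line was blank (cur = [] with runs present).
def stateOf (runs : List (List String)) (cur : List String) : List String :=
  if cur = [] then (if runs = [] then [] else List.intercalate [""] runs ++ [""])
  else List.intercalate [""] (runs ++ [cur])

theorem inter_cons {α : Type} (sep x : List α) (xs : List (List α)) (h : xs ≠ []) :
    sep.intercalate (x :: xs) = x ++ sep ++ sep.intercalate xs := by
  obtain ⟨y, ys, rfl⟩ := List.exists_cons_of_ne_nil h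
  simp [List.intercalate, List.intersperse]

theorem inter_singleton {α : Type} (sep x : List α) :
    sep.intercalate [x] = x := by
  simp [List.intercalate, List.intersperse]

theorem inter_append {α : Type} (sep : List α) (xs ys : List (List α)) (hx : xs ≠ []) (hy : ys ≠ []) :
    sep.intercalate (xs ++ ys) = sep.intercalate xs ++ sep ++ sep.intercalate ys := by
  induction xs with
  | nil => exact absurd rfl hx
  | cons x xs ih =>
    cases xs with
    | nil =>
      rw [List.singleton_append, inter_cons sep x ys hy, inter_singleton]
    | cons x' xs' =>
      rw [List.cons_append, inter_cons sep x ((x' :: xs') ++ ys) (by simp),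
        inter_cons sep x (x' :: xs') (by simp), ih (by simp)]
      simp [List.append_assoc]

theorem inter_ne_nil {α : Type} (sep : List α) (xs : List (List α)) (hxs : xs ≠ [])
    (hh : ∀ x ∈ xs, x ≠ []) : sep.intercalate xs ≠ [] := by
  obtain ⟨y, ys, rfl⟩ := List.exists_cons_of_ne_nil hxs
  have hy : y ≠ [] := hh y (by simp)
  cases ys with
  | nil => rw [inter_singleton]; exact hy
  | cons z zs =>
    rw [inter_cons _ _ _ (by simp)]
    intro hcontra
    simp only [List.append_eq_nil_iff] at hcontra
    exact hy hcontra.1.1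

theorem map_inter {α β : Type} (f : α → β) (sep : List α) (xs : List (List α)) :
    (sep.intercalate xs).map f = (sep.map f).intercalate (xs.map (List.map f)) := by
  induction xs with
  | nil => simp [List.intercalate]
  | cons x xs ih =>
    cases xs with
    | nil => simp [inter_singleton]
    | cons y ys =>
      have h2 := inter_cons (sep.map f) (x.map f) ((y :: ys).map (List.map f))
        (by simp)
      rw [inter_cons sep x (y :: ys) (by simp)]
      simp only [List.map_cons] at h2 ih ⊢
      rw [h2]
      simp [ih]

-- the first element of the intercalation is a non-blank line
theorem inter_head_ne (runs : List (List String)) (h : runs ≠ [])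
    (hg : ∀ r ∈ runs, r ≠ [] ∧ ∀ s ∈ r, s ≠ "") :
    ∃ a t, List.intercalate [("" : String)] runs = a :: t ∧ a ≠ "" := by
  obtain ⟨r, rest, rfl⟩ := List.exists_cons_of_ne_nil h
  obtain ⟨hr, hs⟩ := hg r (by simp)
  obtain ⟨a, r', rfl⟩ := List.exists_cons_of_ne_nil hr
  cases rest with
  | nil =>
    refine ⟨a, r', ?_, hs a (by simp)⟩
    rw [inter_singleton]
  | cons q qs =>
    refine ⟨a, r' ++ [""] ++ [""].intercalate (q :: qs), ?_, hs a (by simp)⟩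
    rw [inter_cons _ _ _ (by simp)]
    simp [List.append_assoc]

-- the last element of the intercalation is a non-blank line
theorem inter_last_ne (runs : List (List String)) (h : runs ≠ [])
    (hg : ∀ r ∈ runs, r ≠ [] ∧ ∀ s ∈ r, s ≠ "") :
    ∃ t a, List.intercalate [("" : String)] runs = t ++ [a] ∧ a ≠ "" := by
  rcases (List.eq_nil_or_concat runs) with hnil | ⟨rs, r, rfl⟩
  · exact absurd hnil h
  · obtain ⟨hr, hs⟩ := hg r (by simp)
    rcases (List.eq_nil_or_concat r) with hrnil | ⟨r', a, rfl⟩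
    · exact absurd hrnil hr
    · have ha : a ≠ "" := hs a (by simp)
      cases rs with
      | nil =>
        refine ⟨r', a, ?_, ha⟩
        simp [inter_singleton]
      | cons q qs =>
        refine ⟨[""].intercalate (q :: qs) ++ [""] ++ r', a, ?_, ha⟩
        rw [List.concat_eq_append, List.concat_eq_append,
          inter_append [""] (q :: qs) [r' ++ [a]] (by simp) (by simp), inter_singleton]
        simp [List.append_assoc]

theorem popFrontA_cons_ne (a : String) (t : List String) (h : a ≠ "") :
    popFrontA (a :: t) = a :: t := by
  simp [popFrontA, h]

theorem popBackA_append_ne (t : List String) (a : String) (h : a ≠ "") :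
    popBackA (t ++ [a]) = t ++ [a] := by
  simp [popBackA, popFrontA, h]

theorem popBackA_append_blank (l : List String) : popBackA (l ++ [""]) = popBackA l := by
  simp [popBackA, popFrontA]

theorem stateOf_append_line (runs : List (List String)) (cur : List String) (line : String) :
    stateOf runs cur ++ [line] = stateOf runs (cur ++ [line]) := by
  by_cases hc : cur = []
  · subst hc
    by_cases hr : runs = []
    · subst hr; simp [stateOf, inter_singleton]
    · have h1 : stateOf runs [] = [""].intercalate runs ++ [""] := by simp [stateOf, hr]
      have h2 : stateOf runs ([] ++ [line]) = [""].intercalate (runs ++ [[line]]) := by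
        simp [stateOf]
      rw [h1, h2, inter_append [""] runs [[line]] hr (by simp), inter_singleton]
  · have h1 : stateOf runs cur = [""].intercalate (runs ++ [cur]) := by simp [stateOf, hc]
    have h2 : stateOf runs (cur ++ [line]) = [""].intercalate (runs ++ [cur ++ [line]]) := by
      simp [stateOf, hc]
    rw [h1, h2]
    by_cases hr : runs = []
    · subst hr; simp [inter_singleton]
    · rw [inter_append [""] runs [cur] hr (by simp),
        inter_append [""] runs [cur ++ [line]] hr (by simp), inter_singleton, inter_singleton]
      simp [List.append_assoc]

-- main loop correspondence: A's accumulator tracks B's (runs, cur) state, and the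
-- state stays "good" (runs are non-empty lists of non-blank lines, cur non-blank lines)
theorem loop_eq : ∀ (lines : List String) (runs : List (List String)) (cur : List String),
    (∀ r ∈ runs, r ≠ [] ∧ ∀ s ∈ r, s ≠ "") → (∀ s ∈ cur, s ≠ "") →
    joinedLoopA (stateOf runs cur) lines
        = stateOf (runsLoopB runs cur lines).1 (runsLoopB runs cur lines).2
      ∧ (∀ r ∈ (runsLoopB runs cur lines).1, r ≠ [] ∧ ∀ s ∈ r, s ≠ "")
      ∧ (∀ s ∈ (runsLoopB runs cur lines).2, s ≠ "") := by
  intro lines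
  induction lines with
  | nil => intro runs cur hr hc; exact ⟨rfl, hr, hc⟩
  | cons line rest ih =>
    intro runs cur hr hc
    by_cases hl : line = ""
    · subst hl
      simp only [joinedLoopA, runsLoopB,
        if_neg (show ¬(("" : String) ≠ "") by simp)]
      by_cases hc0 : cur = []
      · subst hc0
        rw [if_neg (show ¬(([] : List String) ≠ []) by simp)]
        by_cases hr0 : runs = []
        · subst hr0
          rw [if_neg (by decide :
            ¬(stateOf [] [] ≠ [] ∧ PySem.List.pyGetD (stateOf [] []) (-1) "" ≠ ""))]
          exact ih [] [] hr hc
        · have hst : stateOf runs [] = [""].intercalate runs ++ [""] := by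
            simp [stateOf, hr0]
          have hcond : ¬(stateOf runs [] ≠ [] ∧
              PySem.List.pyGetD (stateOf runs []) (-1) "" ≠ "") := by
            rintro ⟨-, hlast⟩
            apply hlast
            rw [hst]
            exact PySem.List.pyGetD_neg_one_append_singleton _ _ _
          rw [if_neg hcond]
          exact ih runs [] hr hc
      · rw [if_pos hc0]
        have hall : ∀ r ∈ runs ++ [cur], r ≠ [] ∧ ∀ s ∈ r, s ≠ "" := by
          intro r hrr
          rcases List.mem_append.mp hrr with h1 | h2
          · exact hr r h1
          · simp only [List.mem_singleton] at h2; subst h2; exact ⟨hc0, hc⟩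
        obtain ⟨t, a, heq, ha⟩ := inter_last_ne (runs ++ [cur]) (by simp) hall
        have hst : stateOf runs cur = t ++ [a] := by
          rw [show stateOf runs cur = [""].intercalate (runs ++ [cur]) by simp [stateOf, hc0]]
          exact heq
        have hcond : stateOf runs cur ≠ [] ∧
            PySem.List.pyGetD (stateOf runs cur) (-1) "" ≠ "" := by
          constructor
          · rw [hst]; simp
          · rw [hst, PySem.List.pyGetD_neg_one_append_singleton]; exact ha
        rw [if_pos hcond]
        have hstep : stateOf runs cur ++ [""] = stateOf (runs ++ [cur]) [] := by
          rw [show stateOf runs cur = [""].intercalate (runs ++ [cur]) by simp [stateOf, hc0],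
            show stateOf (runs ++ [cur]) [] = [""].intercalate (runs ++ [cur]) ++ [""] by
              simp [stateOf]]
        rw [hstep]
        exact ih (runs ++ [cur]) [] hall (by simp)
    · simp only [joinedLoopA, runsLoopB, if_neg hl, if_pos hl]
      rw [stateOf_append_line]
      exact ih runs (cur ++ [line]) hr
        (by intro s hs
            rcases List.mem_append.mp hs with h1 | h2
            · exact hc s h1
            · simp only [List.mem_singleton] at h2; subst h2; exact hl)

-- the two pop loops reduce A's final accumulator to the blank-separated paragraph list
theorem trim_eq (runs : List (List String)) (cur : List String)
    (hr : ∀ r ∈ runs, r ≠ [] ∧ ∀ s ∈ r, s ≠ "") (hc : ∀ s ∈ cur, s ≠ "") :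
    popBackA (popFrontA (stateOf runs cur))
      = List.intercalate [""] (if cur ≠ [] then runs ++ [cur] else runs) := by
  by_cases hc0 : cur = []
  · subst hc0
    rw [if_neg (show ¬(([] : List String) ≠ []) by simp)]
    by_cases hr0 : runs = []
    · subst hr0; simp [stateOf, popFrontA, popBackA, List.intercalate]
    · obtain ⟨a, t, hhd, ha⟩ := inter_head_ne runs hr0 hr
      obtain ⟨t', b, hlast, hb⟩ := inter_last_ne runs hr0 hr
      have hst : stateOf runs [] = [""].intercalate runs ++ [""] := by simp [stateOf, hr0]
      rw [hst, hhd, List.cons_append, popFrontA_cons_ne a _ ha, ← List.cons_append, ← hhd,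
        popBackA_append_blank, hlast, popBackA_append_ne _ _ hb]
  · have hall : ∀ r ∈ runs ++ [cur], r ≠ [] ∧ ∀ s ∈ r, s ≠ "" := by
      intro r hrr
      rcases List.mem_append.mp hrr with h1 | h2
      · exact hr r h1
      · simp only [List.mem_singleton] at h2; subst h2; exact ⟨hc0, hc⟩
    obtain ⟨a, t, hhd, ha⟩ := inter_head_ne (runs ++ [cur]) (by simp) hall
    obtain ⟨t', b, hlast, hb⟩ := inter_last_ne (runs ++ [cur]) (by simp) hall
    have hst : stateOf runs cur = [""].intercalate (runs ++ [cur]) := by simp [stateOf, hc0]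
    rw [if_pos hc0, hst, hhd, popFrontA_cons_ne a _ ha, ← hhd, hlast,
      popBackA_append_ne _ _ hb]

-- char-level: joining the blank-interleaved lines with "\n" = joining the paragraphs with "\n\n"
theorem join2 (qs : List (List (List Char))) (h : ∀ q ∈ qs, q ≠ []) :
    List.intercalate ['\n'] (List.intercalate [([] : List Char)] qs)
      = List.intercalate ['\n', '\n'] (qs.map (List.intercalate ['\n'])) := by
  induction qs with
  | nil => simp [List.intercalate]
  | cons q rest ih =>
    cases rest with
    | nil => rw [inter_singleton, List.map_singleton, inter_singleton]
    | cons q' rest' =>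
      have hq : q ≠ [] := h q (by simp)
      have hrest : ∀ x ∈ q' :: rest', x ≠ [] := fun x hx => h x (by simp [hx])
      have hR : List.intercalate [([] : List Char)] (q' :: rest') ≠ [] :=
        inter_ne_nil _ _ (by simp) hrest
      rw [inter_cons [([] : List Char)] q (q' :: rest') (by simp), List.append_assoc,
        inter_append ['\n'] q ([[]] ++ List.intercalate [[]] (q' :: rest')) hq (by simp),
        inter_append ['\n'] [[]] _ (by simp) hR, inter_singleton,
        List.map_cons, inter_cons ['\n', '\n'] _ _ (by simp), ih hrest]
      simp [List.append_assoc]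

-- string-level version, via the char-level lemma
theorem join_eq (final : List (List String)) (h : ∀ r ∈ final, r ≠ []) :
    PySem.Str.join "\n" (List.intercalate [""] final)
      = PySem.Str.join "\n\n" (final.map (fun r => PySem.Str.join "\n" r)) := by
  simp only [PySem.Str.join, PySem.Chars.join]
  congr 1
  have h1 : ("\n" : String).toList = ['\n'] := rfl
  have h2 : ("\n\n" : String).toList = ['\n', '\n'] := rfl
  have h3 : ("" : String).toList = ([] : List Char) := rfl
  rw [h1, h2, map_inter String.toList [""] final]
  simp only [List.map_map, List.map_cons, List.map_nil, h3]
  rw [Function.comp_def]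
  simp only [String.toList_ofList]
  rw [join2 (final.map (List.map String.toList))
    (by intro q hq
        obtain ⟨r, hr, rfl⟩ := List.mem_map.mp hq
        simpa using h r hr)]
  simp [List.map_map, Function.comp_def]

-- ===== VERDICT (by name: the statement is the Claim_ definition above) =====
theorem join_lines_py_spec : Claim_equal_join_lines_py := by
  intro lines _
  show join_lines_py lines = join_lines_py_alt lines
  obtain ⟨hmain, hruns, hcur⟩ := loop_eq lines [] [] (by simp) (by simp)
  have h0 : ([] : List String) = stateOf [] [] := by decide
  have hfin : ∀ r ∈ (if (runsLoopB [] [] lines).2 ≠ []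
      then (runsLoopB [] [] lines).1 ++ [(runsLoopB [] [] lines).2]
      else (runsLoopB [] [] lines).1), r ≠ [] := by
    intro r hrr
    by_cases hcc : (runsLoopB [] [] lines).2 ≠ []
    · rw [if_pos hcc] at hrr
      rcases List.mem_append.mp hrr with h1 | h2
      · exact (hruns r h1).1
      · simp only [List.mem_singleton] at h2; subst h2; exact hcc
    · rw [if_neg hcc] at hrr
      exact (hruns r hrr).1
  show PySem.Str.strip (PySem.Str.join "\n" (popBackA (popFrontA (joinedLoopA [] lines))))
    = PySem.Str.strip (PySem.Str.join "\n\n"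
        ((if (runsLoopB [] [] lines).2 ≠ []
          then (runsLoopB [] [] lines).1 ++ [(runsLoopB [] [] lines).2]
          else (runsLoopB [] [] lines).1).map (fun r => PySem.Str.join "\n" r)))
  conv_lhs => rw [h0]
  rw [hmain, trim_eq _ _ hruns hcur]
  exact congrArg PySem.Str.strip (join_eq _ hfin)
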